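-- pv_equiv track=rewrite | github.com/elapuestojoe/Iprep | python/graphs/EfficientRoadNetwork.py | efficientRoadNetwork
-- ===== SOURCE A (Python) =====
-- def expandVertex(i, visited, adjacencyList, level, maxLevel):
--     if(level < maxLevel and (not visited[i])):
--         visited[i] = True
--         for edge in adjacencyList[i]:
--             expandVertex(edge, visited, adjacencyList, level+1, maxLevel)
--
-- def efficientRoadNetwork(n, roads):
--     # DO BFS on n levels O(V^2)
--
--     #Build adjacency list
--     adjacencyList = []
--     for i in range(n):
--         adjacencyList.append([])
--     for road in roads:
--         adjacencyList[road[0]].append(road[1])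
--         adjacencyList[road[1]].append(road[0])
--
--     for i in range(n): #O(V)
--         visited = [False]*n
--
--         expandVertex(i, visited, adjacencyList, 0, 3) #O(V)
--         for i in range(len(visited)):
--             if(not visited[i]):
--                 return False
--     return True
-- ===== SOURCE B (Python) =====
-- def efficientRoadNetwork(n, roads):
--     # Same depth-limited traversal, but with an explicit stack instead of recursion.
--     adjacencyList = [[] for _ in range(n)]
--     for road in roads:
--         adjacencyList[road[0]].append(road[1])
--         adjacencyList[road[1]].append(road[0])
--     for start in range(n):
--         visited = [False] * n
--         stack = [(start, 0)]
--         while stack: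
--             node, level = stack.pop()
--             if level < 3 and not visited[node]:
--                 visited[node] = True
--                 for nb in reversed(adjacencyList[node]):
--                     stack.append((nb, level + 1))
--         if not all(visited):
--             return False
--     return True
-- ===== Notes on version B (the rewrite author's own statement) =====
-- stated objective: alternative
-- what changed: The recursive depth-limited expandVertex is replaced by an explicit stack loop that pops (node, level) pairs, checking the level bound and visited flag at pop time and pushing neighbors in reversed order.
import Mathlib
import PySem

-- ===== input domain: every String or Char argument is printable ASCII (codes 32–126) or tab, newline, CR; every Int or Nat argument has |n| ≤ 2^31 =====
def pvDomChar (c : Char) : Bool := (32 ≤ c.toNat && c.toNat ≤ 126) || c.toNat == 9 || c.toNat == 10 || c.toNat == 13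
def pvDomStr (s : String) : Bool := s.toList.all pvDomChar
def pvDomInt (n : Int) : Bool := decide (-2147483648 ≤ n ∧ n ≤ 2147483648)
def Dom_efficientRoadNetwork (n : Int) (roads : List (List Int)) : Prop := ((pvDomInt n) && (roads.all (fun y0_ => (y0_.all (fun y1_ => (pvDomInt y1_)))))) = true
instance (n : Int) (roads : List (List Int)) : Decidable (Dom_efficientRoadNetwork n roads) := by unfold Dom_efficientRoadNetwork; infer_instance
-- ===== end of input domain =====

-- B replaces the recursive depth-limited DFS by an explicit stack loop (iterative decomposition); same cost.

-- Shared helper: Python list indexing with possible negative index, normalised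
-- (under Pre_ the index is always in [-n, n), so this matches Python exactly).
def pvIdx (n i : Int) : Nat := (if i < 0 then i + n else i).toNat

-- Shared helper: adjacency-list construction (identical in A and B).
def pvBuildAdj (n : Int) (roads : List (List Int)) : List (List Int) :=
  roads.foldl
    (fun adj road =>
      let a := road.getD 0 0
      let b := road.getD 1 0
      let adj1 := adj.set (pvIdx n a) ((adj.getD (pvIdx n a) []) ++ [b])
      adj1.set (pvIdx n b) ((adj1.getD (pvIdx n b) []) ++ [a]))
    (List.replicate n.toNat [])

-- ===== PORT A =====
-- expandVertex with fuel = maxLevel - level (fuel 0 ⟺ level < maxLevel fails).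
def expandVertexA (adj : List (List Int)) (n : Int) : Nat → Int → List Bool → List Bool
  | 0, _, visited => visited
  | f + 1, i, visited =>
    if visited.getD (pvIdx n i) false then visited
    else
      (adj.getD (pvIdx n i) []).foldl
        (fun w e => expandVertexA adj n f e w)
        (visited.set (pvIdx n i) true)

def efficientRoadNetwork (n : Int) (roads : List (List Int)) : Bool :=
  let adjacencyList := pvBuildAdj n roads
  (List.range n.toNat).all (fun i =>
    let visited := expandVertexA adjacencyList n 3 (Int.ofNat i) (List.replicate n.toNat false)
    visited.all (fun b => b))

-- ===== PORT B =====
def pvMaxLen (adj : List (List Int)) : Nat := adj.foldr (fun l m => max l.length m) 0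

theorem pvMaxLen_getD (adj : List (List Int)) (k : Nat) :
    (adj.getD k []).length ≤ pvMaxLen adj := by
  induction adj generalizing k with
  | nil => simp [pvMaxLen]
  | cons h t ih =>
    cases k with
    | zero =>
      simp only [pvMaxLen, List.foldr, List.getD_cons_zero]
      exact le_max_left _ _
    | succ k =>
      simp only [pvMaxLen, List.foldr, List.getD_cons_succ]
      exact le_trans (ih k) (le_max_right _ _)

-- pushing the reversed neighbour list onto the stack head = prepending in forward order
theorem push_reversed (l : List Int) (lvl : Nat) (rest : List (Int × Nat)) :
    l.reverse.foldl (fun st e => (e, lvl) :: st) rest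
      = l.map (fun e => (e, lvl)) ++ rest := by
  induction l generalizing rest with
  | nil => simp
  | cons a t ih => simp [List.foldl_append, ih]

def pvCost (adj : List (List Int)) (p : Int × Nat) : Nat := (pvMaxLen adj + 1) ^ (3 - p.2)

-- explicit-stack traversal: pop (node, level); test level bound and visited flag at pop time
def stackLoop (adj : List (List Int)) (n : Int) : List (Int × Nat) → List Bool → List Bool
  | [], visited => visited
  | (node, level) :: rest, visited =>
    if level < 3 ∧ ¬ (visited.getD (pvIdx n node) false) then
      stackLoop adj n
        ((adj.getD (pvIdx n node) []).reverse.foldl (fun st e => (e, level + 1) :: st) rest)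
        (visited.set (pvIdx n node) true)
    else
      stackLoop adj n rest visited
termination_by st _ => (st.map (pvCost adj)).sum
decreasing_by
  · rw [push_reversed]
    simp only [List.map_append, List.sum_append, List.map_map, List.map_cons, List.sum_cons]
    have hlen : (adj.getD (pvIdx n node) []).length ≤ pvMaxLen adj := pvMaxLen_getD adj _
    have hs : ∀ (l : List Int),
        (l.map ((pvCost adj) ∘ fun e => (e, level + 1))).sum
          = l.length * (pvMaxLen adj + 1) ^ (3 - (level + 1)) := by
      intro l
      induction l with
      | nil => simp
      | cons a t iht => simp [pvCost, iht]; ring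
    rw [hs]
    have hkey : (adj.getD (pvIdx n node) []).length * (pvMaxLen adj + 1) ^ (3 - (level + 1))
        < pvCost adj (node, level) := by
      have h3 : 3 - level = (3 - (level + 1)) + 1 := by omega
      calc (adj.getD (pvIdx n node) []).length * (pvMaxLen adj + 1) ^ (3 - (level + 1))
          ≤ pvMaxLen adj * (pvMaxLen adj + 1) ^ (3 - (level + 1)) :=
            Nat.mul_le_mul_right _ hlen
        _ < (pvMaxLen adj + 1) * (pvMaxLen adj + 1) ^ (3 - (level + 1)) :=
            (Nat.mul_lt_mul_right (pow_pos (Nat.succ_pos _) _)).mpr (Nat.lt_succ_self _)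
        _ = pvCost adj (node, level) := by rw [pvCost, h3, pow_succ]; ring
    omega
  · simp only [List.map_cons, List.sum_cons]
    have : 0 < pvCost adj (node, level) := pow_pos (Nat.succ_pos _) _
    omega

def efficientRoadNetwork_alt (n : Int) (roads : List (List Int)) : Bool :=
  let adjacencyList := pvBuildAdj n roads
  (List.range n.toNat).all (fun start =>
    let visited := stackLoop adjacencyList n [(Int.ofNat start, 0)] (List.replicate n.toNat false)
    visited.all (fun b => b))

-- ===== PRECONDITION & SPEC =====
-- Exactly the inputs on which the Python A returns: every road has at least two
-- entries and both endpoints are valid (possibly negative) Python indices into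
-- the n adjacency lists; otherwise A raises IndexError.
def Pre_efficientRoadNetwork (n : Int) (roads : List (List Int)) : Prop :=
  ∀ road ∈ roads, 2 ≤ road.length ∧
    -n ≤ road.getD 0 0 ∧ road.getD 0 0 < n ∧
    -n ≤ road.getD 1 0 ∧ road.getD 1 0 < n
instance (n : Int) (roads : List (List Int)) : Decidable (Pre_efficientRoadNetwork n roads) := by
  unfold Pre_efficientRoadNetwork; infer_instance

def pvWitness_efficientRoadNetwork : Int × List (List Int) := (3, [[0, 1], [1, 2]])

def Spec_efficientRoadNetwork (n : Int) (roads : List (List Int)) (out : Bool) : Prop := out = efficientRoadNetwork_alt n roads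
instance (n : Int) (roads : List (List Int)) (out : Bool) : Decidable (Spec_efficientRoadNetwork n roads out) := by unfold Spec_efficientRoadNetwork; infer_instance

-- ===== CLAIM (what is proved, stated in full; the proofs are below) =====
def Claim_equal_efficientRoadNetwork : Prop := ∀ (n : Int) (roads : List (List Int)), Dom_efficientRoadNetwork n roads → Pre_efficientRoadNetwork n roads → Spec_efficientRoadNetwork n roads (efficientRoadNetwork n roads)

-- ===== LEMMAS AND PROOFS =====

-- Popping one (node, level) entry from the stack produces exactly the visited
-- array that one recursive expandVertex call with fuel 3 - level produces.
theorem stackLoop_expand (adj : List (List Int)) (n : Int) :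
    ∀ (f level : Nat), 3 - level = f →
      ∀ (i : Int) (rest : List (Int × Nat)) (v : List Bool),
        stackLoop adj n ((i, level) :: rest) v
          = stackLoop adj n rest (expandVertexA adj n f i v) := by
  intro f
  induction f with
  | zero =>
    intro level hl i rest v
    have h3 : ¬ level < 3 := by omega
    rw [stackLoop, expandVertexA]
    simp [h3]
  | succ f ih =>
    intro level hl i rest v
    have h3 : level < 3 := by omega
    rw [stackLoop, expandVertexA]
    by_cases hv : v.getD (pvIdx n i) false
    · simp only [List.getD] at hv
      simp [hv, h3]
    · simp only [h3, hv, not_false_eq_true, and_self, if_true, if_false,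
        Bool.false_eq_true]
      rw [push_reversed]
      generalize (v.set (pvIdx n i) true) = w
      induction (adj.getD (pvIdx n i) []) generalizing rest w with
      | nil => simp [List.foldl]
      | cons a t iht =>
        simp only [List.map_cons, List.cons_append, List.foldl]
        rw [ih (level + 1) (by omega) a, iht]

theorem stackLoop_eq_expand (adj : List (List Int)) (n : Int) (i : Int) (v : List Bool) :
    stackLoop adj n [(i, 0)] v = expandVertexA adj n 3 i v := by
  rw [stackLoop_expand adj n 3 0 rfl i [] v, stackLoop]

-- ===== VERDICT (by name: the statement is the Claim_ definition above) =====
theorem efficientRoadNetwork_spec : Claim_equal_efficientRoadNetwork := by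
  intro n roads _ _
  unfold Spec_efficientRoadNetwork efficientRoadNetwork efficientRoadNetwork_alt
  simp only [stackLoop_eq_expand]
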